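-- pv_equiv track=rewrite | github.com/giangduong96/PTO | A GIANG/A/largestintersection.py | intersectionArea
-- ===== SOURCE A (Python) =====
-- def intersectionArea(row, col, WELane, NSLane):
--     """
--     :type row: int
--     :type col: int
--     :type WELane: List[int]
--     :type NSLane: List[int]
--     :rtype: int
--     """
--     rowlane = set(WELane)
--     collane = set(NSLane)
--
--     row = 0
--     col = 0
--
--     for num in rowlane:
--         if num - 1 not in rowlane:
--             current_num = num
--             current_streak = 1
--
--             while current_num + 1 in rowlane:
--                 current_num += 1
--                 current_streak += 1
--
--             row = max(row, current_streak)
--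
--     for num in collane:
--         if num - 1 not in collane:
--             current_num = num
--             current_streak = 1
--
--             while current_num + 1 in collane:
--                 current_num += 1
--                 current_streak += 1
--
--             col = max(col, current_streak)
--
--     maxlength = col * row
--     return maxlength
-- ===== SOURCE B (Python) =====
-- def intersectionArea(row, col, WELane, NSLane):
--     def longest_run(lst):
--         vals = sorted(set(lst))
--         if not vals:
--             return 0
--         best = 1
--         cur = 1
--         prev = vals[0]
--         for y in vals[1:]:
--             if y == prev + 1:
--                 cur += 1
--             else:
--                 best = max(best, cur)
--                 cur = 1
--             prev = y
--         return max(best, cur)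
--     return longest_run(WELane) * longest_run(NSLane)
-- ===== Notes on version B (the rewrite author's own statement) =====
-- stated objective: idiomatic
-- what changed: Replaces the hash-set start-probing (for each element, test num-1 membership, then a while loop probing num+1, num+2, ... in the set) by sorting the deduplicated values once and finding the longest consecutive run in a single adjacency scan.
import Mathlib
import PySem

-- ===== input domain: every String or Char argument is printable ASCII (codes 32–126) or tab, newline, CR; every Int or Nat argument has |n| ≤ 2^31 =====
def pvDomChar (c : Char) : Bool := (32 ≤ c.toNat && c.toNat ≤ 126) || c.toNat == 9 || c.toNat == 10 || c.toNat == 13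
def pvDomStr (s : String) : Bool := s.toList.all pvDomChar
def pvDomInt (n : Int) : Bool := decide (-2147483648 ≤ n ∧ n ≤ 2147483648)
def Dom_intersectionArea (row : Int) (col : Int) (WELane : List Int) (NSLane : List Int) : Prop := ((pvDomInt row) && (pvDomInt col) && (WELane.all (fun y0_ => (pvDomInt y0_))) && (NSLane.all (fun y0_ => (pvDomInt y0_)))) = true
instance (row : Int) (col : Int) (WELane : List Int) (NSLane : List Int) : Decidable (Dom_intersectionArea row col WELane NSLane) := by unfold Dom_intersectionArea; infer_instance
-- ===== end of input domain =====

-- B replaces A's hash-set start-probing (membership tests on num-1 / num+1, num+2, …) by one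
-- sorted-dedup pass that scans adjacent elements for the longest consecutive run (idiomatic, not faster).

-- ===== PORT A =====
-- A's inner `while current_num + 1 in lane` loop, fuelled by the set size: a chain
-- num+1, …, num+c of DISTINCT members of the set has c ≤ |set| - 1 (num itself is also a member),
-- so fuel = s.length is never exhausted while the membership test still holds — exact.
def pyCountUp (s : List Int) (n : Int) : Nat → Nat
  | 0 => 0
  | fuel + 1 => if (n + 1) ∈ s then pyCountUp s (n + 1) fuel + 1 else 0

-- the body A executes for each of its two identical `for num in <lane set>` loops
-- (row starts at 0; current_streak starts at 1 and gains the while-loop count)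
def pyLaneMax (s : List Int) : Int :=
  s.foldl (fun acc num =>
    if (num - 1) ∈ s then acc
    else max acc (1 + (pyCountUp s num s.length : Int))) 0

def intersectionArea (row : Int) (col : Int) (WELane : List Int) (NSLane : List Int) : Int :=
  let rowlane := PySem.Set.ofList WELane
  let collane := PySem.Set.ofList NSLane
  let row := pyLaneMax rowlane
  let col := pyLaneMax collane
  col * row

-- ===== PORT B =====
-- the `for y in vals[1:]` adjacency scan of Source B, state (prev, cur, best)
def runScan : List Int → Int → Int → Int → Int
  | [], _, cur, best => max best cur
  | y :: ys, prev, cur, best =>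
      if y = prev + 1 then runScan ys y (cur + 1) best
      else runScan ys y 1 (max best cur)

-- Source B's longest_run: sorted(set(lst)), then one adjacency scan
def longestRun (lst : List Int) : Int :=
  match PySem.List.sorted (PySem.Set.ofList lst) (fun x => x) false with
  | [] => 0
  | x :: rest => runScan rest x 1 1

def intersectionArea_alt (row : Int) (col : Int) (WELane : List Int) (NSLane : List Int) : Int :=
  longestRun WELane * longestRun NSLane

-- ===== PRECONDITION & SPEC =====
def Spec_intersectionArea (row : Int) (col : Int) (WELane : List Int) (NSLane : List Int) (out : Int) : Prop := out = intersectionArea_alt row col WELane NSLane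
instance (row : Int) (col : Int) (WELane : List Int) (NSLane : List Int) (out : Int) : Decidable (Spec_intersectionArea row col WELane NSLane out) := by unfold Spec_intersectionArea; infer_instance

-- ===== CLAIM (what is proved, stated in full; the proofs are below) =====
def Claim_equal_intersectionArea : Prop := ∀ (row : Int) (col : Int) (WELane : List Int) (NSLane : List Int), Dom_intersectionArea row col WELane NSLane → Spec_intersectionArea row col WELane NSLane (intersectionArea row col WELane NSLane)


-- ===== LEMMAS AND PROOFS =====

-- [a, a+1, …, a+k-1]
def consecRun (a : Int) : Nat → List Int
  | 0 => []
  | k + 1 => a :: consecRun (a + 1) k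

lemma mem_consecRun : ∀ (k : Nat) (a v : Int), v ∈ consecRun a k ↔ a ≤ v ∧ v < a + k := by
  intro k
  induction k with
  | zero => intro a v; first
    | (simp [consecRun]; omega)
    | simp [consecRun]
  | succ k ih =>
      intro a v
      simp [consecRun, ih (a + 1) v]
      push_cast
      omega

lemma length_consecRun : ∀ (k : Nat) (a : Int), (consecRun a k).length = k := by
  intro k
  induction k with
  | zero => intro a; rfl
  | succ k ih => intro a; simp [consecRun, ih]

-- split off the first maximal consecutive run after x: (number of consecutive
-- successors of x at the front, remainder)
def splitRun (x : Int) : List Int → Nat × List Int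
  | [] => (0, [])
  | y :: ys => if y = x + 1 then ((splitRun y ys).1 + 1, (splitRun y ys).2) else (0, y :: ys)

lemma splitRun_spec : ∀ (t : List Int) (x : Int) (k : Nat) (rest : List Int),
    List.Pairwise (· < ·) (x :: t) → splitRun x t = (k, rest) →
    t = consecRun (x + 1) k ++ rest ∧ (∀ z ∈ rest, x + k + 1 < z) := by
  intro t
  induction t with
  | nil =>
      intro x k rest _ hsp
      simp only [splitRun, Prod.mk.injEq] at hsp
      obtain ⟨rfl, rfl⟩ := hsp
      exact ⟨by simp [consecRun], by simp⟩
  | cons y ys ih =>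
      intro x k rest hp hsp
      have hxy : x < y := (List.pairwise_cons.mp hp).1 y (by simp)
      have hp' : List.Pairwise (· < ·) (y :: ys) := (List.pairwise_cons.mp hp).2
      by_cases h : y = x + 1
      · subst h
        obtain ⟨k', rest', hsp'⟩ : ∃ k' rest', splitRun (x + 1) ys = (k', rest') :=
          ⟨_, _, rfl⟩
        have hsp2 : (k' + 1, rest') = (k, rest) := by
          simpa [splitRun, hsp'] using hsp
        obtain ⟨hk, hr⟩ := Prod.mk.injEq .. ▸ hsp2
        subst hk; subst hr
        obtain ⟨hdec, hrest⟩ := ih (x + 1) k' rest' hp' hsp'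
        constructor
        · show (x + 1) :: ys = consecRun (x + 1) (k' + 1) ++ rest'
          rw [consecRun, List.cons_append]
          exact congrArg _ hdec
        · intro z hz
          have := hrest z hz
          push_cast at this ⊢
          omega
      · have hsp2 : ((0 : Nat), y :: ys) = (k, rest) := by
          simpa [splitRun, h] using hsp
        obtain ⟨hk, hr⟩ := Prod.mk.injEq .. ▸ hsp2
        subst hk; subst hr
        refine ⟨by simp [consecRun], ?_⟩
        intro z hz
        simp at hz
        rcases hz with rfl | hz
        · omega
        · have := (List.pairwise_cons.mp hp').1 z hz
          omega

-- pyCountUp counts exactly the consecutive members, given enough fuel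
lemma countUp_run : ∀ (c : Nat) (s : List Int) (n : Int) (fuel : Nat), c < fuel →
    (∀ i : Nat, i < c → (n + 1 + (i : Int)) ∈ s) → (n + 1 + (c : Int)) ∉ s →
    pyCountUp s n fuel = c := by
  intro c
  induction c with
  | zero =>
      intro s n fuel hf _ hout
      obtain ⟨f, rfl⟩ : ∃ f, fuel = f + 1 := ⟨fuel - 1, by omega⟩
      have : (n + 1) ∉ s := by simpa using hout
      simp [pyCountUp, this]
  | succ c ih =>
      intro s n fuel hf hin hout
      obtain ⟨f, rfl⟩ : ∃ f, fuel = f + 1 := ⟨fuel - 1, by omega⟩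
      have h1 : (n + 1) ∈ s := by simpa using hin 0 (by omega)
      simp only [pyCountUp, if_pos h1]
      have hin' : ∀ i : Nat, i < c → (n + 1 + 1 + (i : Int)) ∈ s := by
        intro i hi
        have h := hin (i + 1) (by omega)
        push_cast at h
        have e : n + 1 + ((i : Int) + 1) = n + 1 + 1 + (i : Int) := by ring
        rw [e] at h
        exact h
      have hout' : (n + 1 + 1 + (c : Int)) ∉ s := by
        push_cast at hout
        have e : n + 1 + ((c : Int) + 1) = n + 1 + 1 + (c : Int) := by ring
        rw [e] at hout
        exact hout
      rw [ih s (n + 1) f (by omega) hin' hout']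

-- pyCountUp only probes values > B when B ≤ n, so membership may change below B
lemma countUp_congr_gt (s s' : List Int) (B : Int)
    (h : ∀ v : Int, B < v → (v ∈ s ↔ v ∈ s')) :
    ∀ (fuel : Nat) (n : Int), B ≤ n → pyCountUp s n fuel = pyCountUp s' n fuel := by
  intro fuel
  induction fuel with
  | zero => intro n _; rfl
  | succ f ih =>
      intro n hn
      have hiff := h (n + 1) (by omega)
      by_cases hm : (n + 1) ∈ s
      · simp [pyCountUp, hm, hiff.mp hm, ih (n + 1) (by omega)]
      · have hm' : (n + 1) ∉ s' := fun hc => hm (hiff.mpr hc)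
        simp [pyCountUp, hm, hm']

lemma countUp_congr_mem (s s' : List Int) (h : ∀ v : Int, v ∈ s ↔ v ∈ s')
    (fuel : Nat) (n : Int) : pyCountUp s n fuel = pyCountUp s' n fuel :=
  countUp_congr_gt s s' n (fun v _ => h v) fuel n le_rfl

-- the loop body of pyLaneMax, membership list and fuel as parameters
def laneStep (m : List Int) (fuel : Nat) (acc num : Int) : Int :=
  if (num - 1) ∈ m then acc else max acc (1 + (pyCountUp m num fuel : Int))

lemma laneStep_max (m : List Int) (fuel : Nat) (i j num : Int) :
    laneStep m fuel (max i j) num = max i (laneStep m fuel j num) := by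
  unfold laneStep
  split_ifs <;> [rfl; exact max_assoc i j _]

lemma foldl_laneStep_max (m : List Int) (fuel : Nat) :
    ∀ (t : List Int) (i j : Int),
      t.foldl (laneStep m fuel) (max i j) = max i (t.foldl (laneStep m fuel) j) := by
  intro t
  induction t with
  | nil => intro i j; rfl
  | cons y ys ih => intro i j; simp only [List.foldl_cons, laneStep_max, ih]

lemma foldl_laneStep_skip (m : List Int) (fuel : Nat) :
    ∀ (m' : List Int), (∀ y ∈ m', (y - 1) ∈ m) → ∀ a : Int,
      m'.foldl (laneStep m fuel) a = a := by
  intro m'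
  induction m' with
  | nil => intro _ a; rfl
  | cons y ys ih =>
      intro h a
      simp only [List.foldl_cons, laneStep, if_pos (h y (by simp))]
      exact ih (fun z hz => h z (by simp [hz])) a

lemma runScan_consec : ∀ (j : Nat) (rest : List Int) (prev cur best : Int),
    runScan (consecRun (prev + 1) j ++ rest) prev cur best =
      runScan rest (prev + (j : Int)) (cur + (j : Int)) best := by
  intro j
  induction j with
  | zero => intro rest prev cur best; simp [consecRun]
  | succ j ih =>
      intro rest prev cur best
      simp only [consecRun, List.cons_append, runScan, if_pos rfl]
      rw [ih rest (prev + 1) (cur + 1) best]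
      push_cast
      ring_nf

lemma runScan_max : ∀ (ys : List Int) (p c b1 b2 : Int),
    runScan ys p c (max b1 b2) = max b1 (runScan ys p c b2) := by
  intro ys
  induction ys with
  | nil => intro p c b1 b2; simp [runScan, max_assoc]
  | cons y t ih =>
      intro p c b1 b2
      by_cases h : y = p + 1
      · simp only [runScan, if_pos h, ih]
      · simp only [runScan, if_neg h, max_assoc, ih]

-- the scan form of B's result on an explicit first element
def lrScan : List Int → Int
  | [] => 0
  | x :: t => runScan t x 1 1

-- core: on a strictly increasing list, A's probing fold computes B's adjacency scan
lemma lane_eq_scan : ∀ (N : Nat) (l : List Int) (fuel : Nat), l.length ≤ N →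
    List.Pairwise (· < ·) l → l.length ≤ fuel →
    l.foldl (laneStep l fuel) 0 = lrScan l := by
  intro N
  induction N with
  | zero =>
      intro l fuel hN _ _
      cases l with
      | nil => rfl
      | cons a t => simp at hN
  | succ N ih =>
      intro l fuel hN hpw hfuel
      match l, hpw with
      | [], _ => rfl
      | x :: t, hpw =>
        obtain ⟨k, rest, hsplit⟩ : ∃ k rest, splitRun x t = (k, rest) := ⟨_, _, rfl⟩
        obtain ⟨hdec, hrest⟩ := splitRun_spec t x k rest hpw hsplit
        subst hdec
        simp only [List.length_cons, List.length_append, length_consecRun] at hN hfuel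
        have hmem : ∀ v : Int,
            v ∈ x :: (consecRun (x + 1) k ++ rest) ↔
              v = x ∨ (x + 1 ≤ v ∧ v < x + 1 + k) ∨ v ∈ rest := by
          intro v
          simp [mem_consecRun]
        have hxm1 : (x - 1) ∉ x :: (consecRun (x + 1) k ++ rest) := by
          rw [hmem]
          push_neg
          refine ⟨by omega, by omega, fun hc => by have := hrest _ hc; omega⟩
        have hxk : (x + 1 + (k : Int)) ∉ x :: (consecRun (x + 1) k ++ rest) := by
          rw [hmem]
          push_neg
          refine ⟨by omega, by omega, fun hc => by have := hrest _ hc; omega⟩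
        have hcount : pyCountUp (x :: (consecRun (x + 1) k ++ rest)) x fuel = k := by
          apply countUp_run k _ x fuel (by omega)
          · intro i hi
            rw [hmem]
            right; left
            constructor <;> [omega; (push_cast; omega)]
          · exact hxk
        have hstep0 :
            laneStep (x :: (consecRun (x + 1) k ++ rest)) fuel 0 x = 1 + (k : Int) := by
          unfold laneStep
          rw [if_neg hxm1, hcount]
          omega
        have hskip : ∀ y ∈ consecRun (x + 1) k,
            (y - 1) ∈ x :: (consecRun (x + 1) k ++ rest) := by
          intro y hy
          rw [mem_consecRun] at hy
          rw [hmem]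
          by_cases h : y = x + 1
          · left; omega
          · right; left; omega
        have hgt : ∀ v : Int, x + (k : Int) < v →
            (v ∈ x :: (consecRun (x + 1) k ++ rest) ↔ v ∈ rest) := by
          intro v hv
          rw [hmem]
          constructor
          · rintro (rfl | h | h)
            · omega
            · omega
            · exact h
          · intro h; right; right; exact h
        have hstep_rest : ∀ (acc z : Int), z ∈ rest →
            laneStep (x :: (consecRun (x + 1) k ++ rest)) fuel acc z =
              laneStep rest fuel acc z := by
          intro acc z hz
          have hzgt := hrest z hz
          unfold laneStep
          have hiff := hgt (z - 1) (by omega)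
          have hcu : pyCountUp (x :: (consecRun (x + 1) k ++ rest)) z fuel =
              pyCountUp rest z fuel :=
            countUp_congr_gt _ _ (x + (k : Int)) hgt fuel z (by omega)
          by_cases h : (z - 1) ∈ x :: (consecRun (x + 1) k ++ rest)
          · rw [if_pos h, if_pos (hiff.mp h)]
          · rw [if_neg h, if_neg (fun hc => h (hiff.mpr hc)), hcu]
        have hpwr : List.Pairwise (· < ·) rest := by
          have := (List.pairwise_cons.mp hpw).2
          exact (List.pairwise_append.mp this).2.1
        have hLHS : (x :: (consecRun (x + 1) k ++ rest)).foldl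
            (laneStep (x :: (consecRun (x + 1) k ++ rest)) fuel) 0 =
            max (1 + (k : Int)) (lrScan rest) := by
          rw [List.foldl_cons, List.foldl_append, hstep0,
            foldl_laneStep_skip _ _ _ hskip]
          conv_lhs => rw [show (1 + (k : Int)) = max (1 + (k : Int)) 0 by omega]
          rw [foldl_laneStep_max]
          refine congrArg _ ?_
          rw [PySem.List.foldl_congr_mem rest _ (laneStep rest fuel) 0 hstep_rest]
          exact ih rest fuel (by omega) hpwr (by omega)
        have hRHS : lrScan (x :: (consecRun (x + 1) k ++ rest)) =
            max (1 + (k : Int)) (lrScan rest) := by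
          show runScan (consecRun (x + 1) k ++ rest) x 1 1 = _
          rw [runScan_consec]
          match rest, hrest with
          | [], _ =>
              show max 1 (1 + (k : Int)) = max (1 + (k : Int)) 0
              omega
          | y :: ys, hrest =>
              have hy : y ≠ x + (k : Int) + 1 := by
                have := hrest y (by simp)
                omega
              show runScan (y :: ys) (x + (k : Int)) (1 + (k : Int)) 1 = _
              rw [show runScan (y :: ys) (x + (k : Int)) (1 + (k : Int)) 1 =
                  runScan ys y 1 (max (1 + (k : Int)) 1) from by
                simp only [runScan]
                rw [if_neg (by omega : ¬ y = x + (k : Int) + 1)]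
                congr 1
                omega]
              rw [runScan_max]
              rfl
        rw [hLHS, hRHS]

-- A's per-lane loop equals B's per-lane function
lemma laneMax_eq_longestRun (xs : List Int) :
    pyLaneMax (PySem.Set.ofList xs) = longestRun xs := by
  have hpw : List.Pairwise (· < ·)
      (PySem.List.sorted (PySem.Set.ofList xs) (fun x => x) false) :=
    PySem.List.sorted_ofList_pairwise_lt xs
  have hperm : (PySem.List.sorted (PySem.Set.ofList xs) (fun x => x) false).Perm
      (PySem.Set.ofList xs) := PySem.List.sorted_perm _ _ _
  unfold pyLaneMax longestRun
  generalize hl : PySem.List.sorted (PySem.Set.ofList xs) (fun x => x) false = l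
    at hpw hperm ⊢
  have hmem : ∀ v : Int, v ∈ PySem.Set.ofList xs ↔ v ∈ l :=
    fun v => hperm.mem_iff.symm
  have hlen : (PySem.Set.ofList xs).length = l.length := hperm.length_eq.symm
  show (PySem.Set.ofList xs).foldl
      (laneStep (PySem.Set.ofList xs) (PySem.Set.ofList xs).length) 0 = _
  have hcomm : ∀ a ∈ PySem.Set.ofList xs, ∀ b ∈ PySem.Set.ofList xs, ∀ z : Int,
      laneStep (PySem.Set.ofList xs) (PySem.Set.ofList xs).length
        (laneStep (PySem.Set.ofList xs) (PySem.Set.ofList xs).length z a) b =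
      laneStep (PySem.Set.ofList xs) (PySem.Set.ofList xs).length
        (laneStep (PySem.Set.ofList xs) (PySem.Set.ofList xs).length z b) a := by
    intro a _ b _ z
    unfold laneStep
    split_ifs <;> first | rfl | exact max_right_comm z _ _
  rw [List.Perm.foldl_eq' hperm.symm hcomm 0]
  have h3 : l.foldl (laneStep (PySem.Set.ofList xs) (PySem.Set.ofList xs).length) 0 =
      l.foldl (laneStep l l.length) 0 := by
    apply PySem.List.foldl_congr_mem
    intro acc z _
    unfold laneStep
    have hcu : pyCountUp (PySem.Set.ofList xs) z (PySem.Set.ofList xs).length =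
        pyCountUp l z l.length := by
      rw [hlen]; exact countUp_congr_mem _ _ hmem l.length z
    by_cases h : (z - 1) ∈ PySem.Set.ofList xs
    · rw [if_pos h, if_pos ((hmem _).mp h)]
    · rw [if_neg h, if_neg (fun hc => h ((hmem _).mpr hc)), hcu]
  rw [h3, lane_eq_scan l.length l l.length le_rfl hpw le_rfl]
  cases l <;> rfl

-- ===== VERDICT (by name: the statement is the Claim_ definition above) =====
theorem intersectionArea_spec : Claim_equal_intersectionArea := by
  intro row col WELane NSLane _
  unfold Spec_intersectionArea intersectionArea intersectionArea_alt
  simp only [laneMax_eq_longestRun]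
  exact mul_comm _ _
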